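-- pv_equiv track=rewrite | github.com/neurobagel/tools | app/api/utility.py | get_indentation
-- ===== SOURCE A (Python) =====
-- from typing import Union
--
-- def get_indentation(json_str: str) -> tuple[Union[str, None], int]:
--     """
--     Extract the indentation of a JSON string, including the indentation character and level.
--     NOTE: Does not account for differing indentation across *different lines* of the same file.
--
--     Parameters
--     ----------
--     json_str : str
--         JSON string
--
--     Returns
--     -------
--     tuple[Union[str, None], int]
--         Tuple containing:
--             - indent_char : str or None
--                 The detected indent character
--             - indent_num : int
--                 The indentation level
--
--     ValueError
--         Raised if multiple indentation characters in the same line are detected.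
--     """
--     indent_num = 0
--     indent_char = None
--
--     for line_num, line in enumerate(json_str.splitlines()):
--         if not line.startswith("{"):
--             for char in line:
--                 if char not in (" ", "\t"):
--                     break
--                 if indent_char is None:
--                     indent_char = char
--                 if char != indent_char:
--                     # NOTE: !r means the line will be represented as a string using Python syntax, including any quotes and escape characters.
--                     # This makes it easier to identify any special characters or formatting issues.
--                     raise ValueError(
--                         f"Found mixed indentation of tabs and spaces in line {line_num}: {line!r}"
--                     )
--                 indent_num += 1
--             break
--
--     return indent_char, indent_num
-- ===== SOURCE B (Python) =====
-- def get_indentation(json_str: str):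
--     for line_num, line in enumerate(json_str.splitlines()):
--         if line.startswith("{"):
--             continue
--         prefix = line[: len(line) - len(line.lstrip(" \t"))]
--         if " " in prefix and "\t" in prefix:
--             raise ValueError(
--                 f"Found mixed indentation of tabs and spaces in line {line_num}: {line!r}"
--             )
--         return (prefix[0] if prefix else None, len(prefix))
--     return (None, 0)
-- ===== Notes on version B (the rewrite author's own statement) =====
-- stated objective: simpler
-- what changed: Replaces A's character-by-character state-machine loop (mutable indent_char/indent_num accumulated per char with break) by slicing the leading whitespace prefix off the first non-'{' line in one step via lstrip and reading char and level directly from the prefix.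
import Mathlib
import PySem

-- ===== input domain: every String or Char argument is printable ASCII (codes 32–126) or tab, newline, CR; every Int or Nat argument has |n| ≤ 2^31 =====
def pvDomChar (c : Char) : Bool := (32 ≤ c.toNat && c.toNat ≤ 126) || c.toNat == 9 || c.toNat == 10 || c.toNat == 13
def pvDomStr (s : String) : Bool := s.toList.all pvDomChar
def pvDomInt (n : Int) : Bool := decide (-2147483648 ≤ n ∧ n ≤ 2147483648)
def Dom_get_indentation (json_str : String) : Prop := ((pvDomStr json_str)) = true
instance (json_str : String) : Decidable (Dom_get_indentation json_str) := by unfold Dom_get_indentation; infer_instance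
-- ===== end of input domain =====

-- B replaces A's per-character state-machine loop by slicing off the leading
-- whitespace prefix of the first non-'{' line in one step (objective: simpler).


-- ===== PORT A =====
-- inner 'for char in line' loop of A: state (indent_char, indent_num);
-- returns none exactly where the Python raises ValueError (mixed indentation)
def pvIndentLoopA : List Char → Option Char → Int → Option (Option Char × Int)
  | [], ic, n => some (ic, n)
  | c :: rest, ic, n =>
    if ¬ (c = ' ' ∨ c = '\t') then some (ic, n)       -- break
    else
      let ic' := match ic with | none => some c | some c0 => some c0
      if some c ≠ ic' then none                        -- raise ValueError
      else pvIndentLoopA rest ic' (n + 1)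

-- outer 'for line in json_str.splitlines()' loop of A (breaks after the first
-- line not starting with '{')
def pvLinesA : List (List Char) → Option (Option Char × Int)
  | [] => some (none, 0)
  | l :: rest =>
    if PySem.Chars.startswith l ['{'] then pvLinesA rest
    else pvIndentLoopA l none 0

def get_indentation (json_str : String) : Option String × Int :=
  match pvLinesA (PySem.Chars.splitlines json_str.toList) with
  | some (ic, n) => (ic.map (fun c => String.ofList [c]), n)
  | none => (none, 0)           -- Python raises ValueError here; excluded by Pre_

-- ===== PORT B =====
-- line.lstrip(" \t"): drop the leading chars belonging to " \t" (exact hand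
-- port of str.lstrip with a chars argument, which PySem does not provide)
def pvLstripST (l : List Char) : List Char := l.dropWhile (fun c => c == ' ' || c == '\t')

-- B's single loop: the first line not starting with '{' decides everything;
-- none = the Python raises ValueError (mixed indentation)
def pvLinesB : List (List Char) → Option (Option String × Int)
  | [] => some (none, 0)
  | l :: rest =>
    if PySem.Chars.startswith l ['{'] then pvLinesB rest
    else
      let pfx := PySem.Chars.slice l none (some ((l.length : Int) - ((pvLstripST l).length : Int)))
      if PySem.Chars.isIn [' '] pfx ∧ PySem.Chars.isIn ['\t'] pfx then none   -- raise ValueError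
      else some ((match pfx with | [] => none | c :: _ => some (String.ofList [c])),
                 (pfx.length : Int))

def get_indentation_alt (json_str : String) : Option String × Int :=
  match pvLinesB (PySem.Chars.splitlines json_str.toList) with
  | some r => r
  | none => (none, 0)           -- Python raises ValueError here; excluded by Pre_

-- ===== PRECONDITION & SPEC =====
-- Pre_ excludes exactly the inputs on which A (and B) raise ValueError: the first
-- line not starting with '{' has both a space and a tab in its leading whitespace.
def Pre_get_indentation (json_str : String) : Prop :=
  (match (PySem.Chars.splitlines json_str.toList).find?
      (fun l => !(PySem.Chars.startswith l ['{'])) with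
   | none => true
   | some l =>
      let p := l.takeWhile (fun c => c == ' ' || c == '\t')
      !(p.contains ' ' && p.contains '\t')) = true
instance (json_str : String) : Decidable (Pre_get_indentation json_str) := by
  unfold Pre_get_indentation; infer_instance

def pvWitness_get_indentation : String := "{\n  \"a\": 1\n}"

def Spec_get_indentation (json_str : String) (out : Option String × Int) : Prop := out = get_indentation_alt json_str
instance (json_str : String) (out : Option String × Int) : Decidable (Spec_get_indentation json_str out) := by unfold Spec_get_indentation; infer_instance

-- ===== CLAIM (what is proved, stated in full; the proofs are below) =====
def Claim_equal_get_indentation : Prop := ∀ (json_str : String), Dom_get_indentation json_str → Pre_get_indentation json_str → Spec_get_indentation json_str (get_indentation json_str)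

-- ===== LEMMAS AND PROOFS =====

-- A's inner loop with the indent char already fixed, on a line whose leading
-- whitespace is all that same char, counts that whitespace
lemma pvIndentLoopA_fixed (rest : List Char) (c : Char) (n : Int)
    (h : ∀ x ∈ rest.takeWhile (fun c => c == ' ' || c == '\t'), x = c) :
    pvIndentLoopA rest (some c) n =
      some (some c, n + ((rest.takeWhile (fun c => c == ' ' || c == '\t')).length : Int)) := by
  induction rest generalizing n with
  | nil => simp [pvIndentLoopA]
  | cons x r ih =>
    by_cases hw : x = ' ' ∨ x = '\t'
    · have hx : x ∈ (x :: r).takeWhile (fun c => c == ' ' || c == '\t') := by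
        rw [List.takeWhile_cons_of_pos (by simp [hw.imp (·) (·)])]
        exact List.mem_cons_self
      have hxc : x = c := h x hx
      have htw : (x :: r).takeWhile (fun c => c == ' ' || c == '\t') =
          x :: r.takeWhile (fun c => c == ' ' || c == '\t') :=
        List.takeWhile_cons_of_pos (by simp [hw.imp (·) (·)])
      have hr : ∀ y ∈ r.takeWhile (fun c => c == ' ' || c == '\t'), y = c := by
        intro y hy
        exact h y (by rw [htw]; exact List.mem_cons_of_mem _ hy)
      rw [htw]
      subst hxc
      simp only [pvIndentLoopA, hw, not_true_eq_false, if_false, ne_eq,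
        ih (n + 1) hr, List.length_cons]
      congr 2
      push_cast
      ring
    · have ht : (x :: r).takeWhile (fun c => c == ' ' || c == '\t') = [] := by
        rw [List.takeWhile_cons_of_neg]
        simp only [Bool.or_eq_true, beq_iff_eq]
        exact fun hc => hw (by simpa using hc)
      simp [pvIndentLoopA, hw, ht]

-- A's inner loop computes the head and length of the leading-whitespace prefix
lemma pvIndentLoopA_eq (l : List Char)
    (hmix : ¬ (' ' ∈ l.takeWhile (fun c => c == ' ' || c == '\t') ∧
               '\t' ∈ l.takeWhile (fun c => c == ' ' || c == '\t'))) :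
    pvIndentLoopA l none 0 =
      some ((l.takeWhile (fun c => c == ' ' || c == '\t')).head?,
            ((l.takeWhile (fun c => c == ' ' || c == '\t')).length : Int)) := by
  cases l with
  | nil => simp [pvIndentLoopA]
  | cons x r =>
    by_cases hw : x = ' ' ∨ x = '\t'
    · have htw : (x :: r).takeWhile (fun c => c == ' ' || c == '\t') =
          x :: r.takeWhile (fun c => c == ' ' || c == '\t') :=
        List.takeWhile_cons_of_pos (by simp [hw.imp (·) (·)])
      have hxm : x ∈ (x :: r).takeWhile (fun c => c == ' ' || c == '\t') := by
        rw [htw]; exact List.mem_cons_self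
      have hr : ∀ y ∈ r.takeWhile (fun c => c == ' ' || c == '\t'), y = x := by
        intro y hy
        have hym : y ∈ (x :: r).takeWhile (fun c => c == ' ' || c == '\t') := by
          rw [htw]; exact List.mem_cons_of_mem _ hy
        have hyw : y = ' ' ∨ y = '\t' := by
          simpa using List.mem_takeWhile_imp hy
        by_contra hne
        apply hmix
        rcases hyw with hy' | hy' <;> rcases hw with hx' | hx'
        · exact absurd (hy'.trans hx'.symm) hne
        · exact ⟨hy' ▸ hym, hx' ▸ hxm⟩
        · exact ⟨hx' ▸ hxm, hy' ▸ hym⟩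
        · exact absurd (hy'.trans hx'.symm) hne
      rw [htw]
      simp only [pvIndentLoopA, hw, not_true_eq_false, if_false, ne_eq,
        List.head?_cons, List.length_cons]
      rw [pvIndentLoopA_fixed r x (0 + 1) hr]
      congr 2
      push_cast
      ring
    · have ht : (x :: r).takeWhile (fun c => c == ' ' || c == '\t') = [] := by
        rw [List.takeWhile_cons_of_neg]
        simp only [Bool.or_eq_true, beq_iff_eq]
        exact fun hc => hw (by simpa using hc)
      simp [pvIndentLoopA, hw, ht]

-- B's prefix slice is the leading-whitespace takeWhile
lemma pvSlice_eq_takeWhile (l : List Char) :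
    PySem.Chars.slice l none (some ((l.length : Int) - ((pvLstripST l).length : Int))) =
      l.takeWhile (fun c => c == ' ' || c == '\t') := by
  have hb : ((l.length : Int) - ((pvLstripST l).length : Int)) =
      ((l.takeWhile (fun c => c == ' ' || c == '\t')).length : Int) := by
    have hlen : l.length - (pvLstripST l).length =
        (l.takeWhile (fun c => c == ' ' || c == '\t')).length := by
      unfold pvLstripST
      have h2 := congrArg List.length
        (List.takeWhile_append_dropWhile (p := fun c => c == ' ' || c == '\t') (l := l))
      simp only [List.length_append] at h2
      omega
    have hle : (pvLstripST l).length ≤ l.length := by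
      unfold pvLstripST; exact List.length_dropWhile_le _ _
    omega
  rw [hb]
  simp only [PySem.Chars.slice_eq_listSlice]
  rw [PySem.List.slice_to _ (by positivity)]
  simp
  exact (List.prefix_iff_eq_take.mp (List.takeWhile_prefix _)).symm

-- 'c in s' for a one-char string is list membership
lemma pvIsIn_singleton (c : Char) (p : List Char) :
    PySem.Chars.isIn [c] p = true ↔ c ∈ p := by
  rw [PySem.Chars.isIn_iff_infix]
  exact List.singleton_infix_iff c p

-- the two outer loops agree under Pre_
lemma pvLines_eq (ls : List (List Char))
    (hpre : ∀ l, ls.find? (fun l => !(PySem.Chars.startswith l ['{'])) = some l →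
      ¬ (' ' ∈ l.takeWhile (fun c => c == ' ' || c == '\t') ∧
         '\t' ∈ l.takeWhile (fun c => c == ' ' || c == '\t'))) :
    (match pvLinesA ls with
      | some (ic, n) => (ic.map (fun c => String.ofList [c]), n)
      | none => ((none : Option String), (0 : Int))) =
    (match pvLinesB ls with
      | some r => r
      | none => ((none : Option String), (0 : Int))) := by
  induction ls with
  | nil => simp [pvLinesA, pvLinesB]
  | cons l rest ih =>
    by_cases hs : PySem.Chars.startswith l ['{'] = true
    · simp only [pvLinesA, pvLinesB, hs, if_true]
      exact ih (fun l' hl' => hpre l' (by rw [List.find?_cons_of_neg (by simp [hs])]; exact hl'))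
    · have hmix := hpre l (List.find?_cons_of_pos (p := fun l => !(PySem.Chars.startswith l ['{'])) (by simp [hs]))
      simp only [pvLinesA, pvLinesB, hs]
      rw [pvIndentLoopA_eq l hmix, pvSlice_eq_takeWhile]
      have hcneg : ¬(PySem.Chars.isIn [' '] (l.takeWhile (fun c => c == ' ' || c == '\t')) = true ∧
          PySem.Chars.isIn ['\t'] (l.takeWhile (fun c => c == ' ' || c == '\t')) = true) :=
        fun hc => hmix ⟨(pvIsIn_singleton _ _).mp hc.1, (pvIsIn_singleton _ _).mp hc.2⟩
      rw [if_neg hcneg]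
      cases l.takeWhile (fun c => c == ' ' || c == '\t') <;> simp

-- ===== VERDICT (by name: the statement is the Claim_ definition above) =====
theorem get_indentation_spec : Claim_equal_get_indentation := by
  intro s _ hpre
  unfold Spec_get_indentation get_indentation get_indentation_alt
  apply pvLines_eq
  intro l hl hcon
  rcases hcon with ⟨h1, h2⟩
  revert hpre
  unfold Pre_get_indentation
  rw [hl]
  simp [h1, h2]
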